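-- pv_equiv track=rewrite | github.com/epilectrik/voynich | phases/EXT_HF_03_procedural_fluency/rare_bigram_section_analysis.py | is_grammar_token
-- ===== SOURCE A (Python) =====
-- GRAMMAR_PREFIXES = {'qo', 'ch', 'sh', 'ok', 'da', 'ot', 'ct', 'kc', 'pc', 'fc'}
--
-- GRAMMAR_SUFFIXES = {'aiin', 'dy', 'ol', 'or', 'ar', 'ain', 'ey', 'edy', 'eey'}
--
-- def is_grammar_token(token):
--     t = token.lower()
--     for pf in GRAMMAR_PREFIXES:
--         if t.startswith(pf):
--             return True
--     for sf in GRAMMAR_SUFFIXES: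
--         if t.endswith(sf):
--             return True
--     return False
-- ===== SOURCE B (Python) =====
-- GRAMMAR_PREFIXES = {'qo', 'ch', 'sh', 'ok', 'da', 'ot', 'ct', 'kc', 'pc', 'fc'}
--
-- # grammar suffixes bucketed by length: one slice lookup per distinct length
-- SUFFIXES_BY_LEN = {
--     2: {'dy', 'ol', 'or', 'ar', 'ey'},
--     3: {'ain', 'edy', 'eey'},
--     4: {'aiin'},
-- }
--
-- def is_grammar_token(token):
--     t = token.lower()
--     if t[:2] in GRAMMAR_PREFIXES:
--         return True
--     for L, bucket in SUFFIXES_BY_LEN.items():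
--         if t[-L:] in bucket:
--             return True
--     return False
-- ===== Notes on version B (the rewrite author's own statement) =====
-- stated objective: idiomatic
-- what changed: Instead of scanning every prefix pattern with startswith and every suffix pattern with endswith, B takes the token's boundary slices once (t[:2], and t[-L:] for each distinct suffix length L in a length-keyed bucket dict) and tests set membership of the slice, so the per-pattern scans disappear.
import Mathlib
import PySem

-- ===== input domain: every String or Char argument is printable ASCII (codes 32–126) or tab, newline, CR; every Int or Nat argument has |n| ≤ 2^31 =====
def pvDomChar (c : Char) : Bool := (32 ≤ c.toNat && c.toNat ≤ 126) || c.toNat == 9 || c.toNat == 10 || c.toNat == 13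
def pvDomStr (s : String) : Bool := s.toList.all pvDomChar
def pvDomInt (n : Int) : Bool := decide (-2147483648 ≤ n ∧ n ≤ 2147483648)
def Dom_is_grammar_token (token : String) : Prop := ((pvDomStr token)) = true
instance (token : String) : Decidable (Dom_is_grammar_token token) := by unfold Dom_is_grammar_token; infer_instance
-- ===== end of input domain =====

-- B replaces A's per-pattern startswith/endswith scans by membership tests of the
-- token's boundary slices in length-keyed pattern sets (objective: idiomatic).

-- ===== PORT A =====
def pvGrammarPrefixes : List String :=
  ["qo", "ch", "sh", "ok", "da", "ot", "ct", "kc", "pc", "fc"]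

def pvGrammarSuffixes : List String :=
  ["aiin", "dy", "ol", "or", "ar", "ain", "ey", "edy", "eey"]

def is_grammar_token (token : String) : Bool :=
  let t := PySem.Str.lower token
  -- 'for pf in …: if t.startswith(pf): return True' = any over the patterns; then the suffix loop
  (pvGrammarPrefixes.any (fun pf => PySem.Str.startswith t pf)) ||
  (pvGrammarSuffixes.any (fun sf => PySem.Str.endswith t sf))

-- ===== PORT B =====
def pvPrefixSet : List (List Char) :=
  ["qo".toList, "ch".toList, "sh".toList, "ok".toList, "da".toList,
   "ot".toList, "ct".toList, "kc".toList, "pc".toList, "fc".toList]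

def pvSuffixBuckets : List (Nat × List (List Char)) :=
  [(2, ["dy".toList, "ol".toList, "or".toList, "ar".toList, "ey".toList]),
   (3, ["ain".toList, "edy".toList, "eey".toList]),
   (4, ["aiin".toList])]

def is_grammar_token_alt (token : String) : Bool :=
  let t := (PySem.Str.lower token).toList
  if pvPrefixSet.contains (PySem.List.slice t none (some 2)) then true  -- t[:2] in GRAMMAR_PREFIXES
  else pvSuffixBuckets.any                                              -- for L, bucket in SUFFIXES_BY_LEN.items(): t[-L:] in bucket
    (fun lb => lb.2.contains (PySem.List.slice t (some (-(lb.1 : Int))) none))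

-- ===== PRECONDITION & SPEC =====
def Spec_is_grammar_token (token : String) (out : Bool) : Prop := out = is_grammar_token_alt token
instance (token : String) (out : Bool) : Decidable (Spec_is_grammar_token token out) := by unfold Spec_is_grammar_token; infer_instance

-- ===== CLAIM (what is proved, stated in full; the proofs are below) =====
def Claim_equal_is_grammar_token : Prop := ∀ (token : String), Dom_is_grammar_token token → Spec_is_grammar_token token (is_grammar_token token)

-- ===== LEMMAS AND PROOFS =====

theorem pv_sw (l p : List Char) : PySem.Chars.startswith l p = (l.take p.length == p) := by
  rw [Bool.eq_iff_iff, beq_iff_eq, PySem.Chars.startswith_iff, List.prefix_iff_eq_take, eq_comm]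

theorem pv_ew (l p : List Char) : PySem.Chars.endswith l p = (l.drop (l.length - p.length) == p) := by
  rw [Bool.eq_iff_iff, beq_iff_eq, PySem.Chars.endswith_iff, List.suffix_iff_eq_drop, eq_comm]

-- ===== VERDICT (by name: the statement is the Claim_ definition above) =====
set_option maxHeartbeats 1000000 in
theorem is_grammar_token_spec : Claim_equal_is_grammar_token := by
  intro token hdom
  unfold Spec_is_grammar_token is_grammar_token is_grammar_token_alt
    pvGrammarPrefixes pvGrammarSuffixes pvPrefixSet pvSuffixBuckets
  set l := (PySem.Str.lower token).toList with hl
  simp only [PySem.Str.startswith_eq, PySem.Str.endswith_eq, ← hl,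
    List.any_cons, List.any_nil, List.contains_cons, List.contains_nil,
    pv_sw, pv_ew, Bool.or_false]
  simp [PySem.List.slice_to, PySem.List.slice_from_neg_ofNat]
  rw [Bool.eq_iff_iff]
  simp only [Bool.or_eq_true, beq_iff_eq, decide_eq_true_eq]
  generalize List.take 2 l = t2
  generalize List.drop (l.length - 2) l = d2
  generalize List.drop (l.length - 3) l = d3
  generalize List.drop (l.length - 4) l = d4
  clear_value l
  clear hl l hdom token
  tauto
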